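-- pv_equiv track=rewrite | github.com/f-code-club/judge-runner | tests/problem/easy/maximum-sum-of-digits/solution/main.py | find_max_digit_sum
-- ===== SOURCE A (Python) =====
-- def sum_digits(x):
--     return sum(int(d) for d in str(x))
--
-- def find_max_digit_sum(n):
--     if n < 10:
--         return n
--     pow10 = 1
--     while pow10 <= n // 10:
--         pow10 *= 10
--     candidate = pow10 - 1
--     a = candidate
--     b = n - a
--     return sum_digits(a) + sum_digits(b)
-- ===== SOURCE B (Python) =====
-- def find_max_digit_sum(n):
--     # Digit DP: recurse on n // 10.  Splitting n = a + b, the last digits of a and b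
--     # sum either to n % 10 (no carry) or to n % 10 + 10 (a carry borrowed from the
--     # higher digits, possible only when n % 10 <= 8); take the better of the two.
--     if n < 10:
--         return n
--     q, r = divmod(n, 10)
--     best = r + find_max_digit_sum(q)
--     if r <= 8:
--         best = max(best, r + 10 + find_max_digit_sum(q - 1))
--     return best
-- ===== Notes on version B (the rewrite author's own statement) =====
-- stated objective: alternative
-- what changed: B discards A's closed-form all-nines candidate (power-of-10 search plus string digit sums of the two parts) and instead computes the maximum by a digit DP recursion: for n >= 10 it splits off the last digit and takes the better of a no-carry split (r + f(n//10)) and a carry split (r + 10 + f(n//10 - 1)).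
import Mathlib
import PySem

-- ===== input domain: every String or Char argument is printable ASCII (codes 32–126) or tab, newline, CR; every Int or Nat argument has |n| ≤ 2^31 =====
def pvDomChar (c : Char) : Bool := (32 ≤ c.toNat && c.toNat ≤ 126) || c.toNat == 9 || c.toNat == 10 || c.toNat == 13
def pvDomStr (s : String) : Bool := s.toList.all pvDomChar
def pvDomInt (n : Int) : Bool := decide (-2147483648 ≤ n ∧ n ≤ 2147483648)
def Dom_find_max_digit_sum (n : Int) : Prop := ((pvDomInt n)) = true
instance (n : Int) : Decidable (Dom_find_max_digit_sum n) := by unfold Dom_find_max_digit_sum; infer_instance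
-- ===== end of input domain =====

-- B replaces A's closed-form all-nines construction with a digit DP recursion on n // 10
-- (last digit split with or without a carry); an alternative algorithm of the same cost.

-- ===== PORT A =====
-- sum(int(d) for d in str(x)); only ever called with x ≥ 0, so every character is a digit
-- and int(d) never raises (the .getD 0 default is never used on reached inputs).
def pv_sum_digits (x : Int) : Int :=
  ((PySem.Int.toStr x).toList.map (fun c => (PySem.Int.ofChars? [c]).getD 0)).sum

-- while pow10 <= n // 10: pow10 *= 10   (structural fuel ≥ iterations, a totality guard only)
def pvPowLoop : Nat → Int → Int → Int
  | 0, _, pow10 => pow10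
  | fuel + 1, m, pow10 => if pow10 ≤ m then pvPowLoop fuel m (pow10 * 10) else pow10

def find_max_digit_sum (n : Int) : Int :=
  if n < 10 then n
  else
    let m := PySem.Int.floordiv n 10
    let pow10 := pvPowLoop (m.toNat + 1) m 1
    let candidate := pow10 - 1
    let a := candidate
    let b := n - a
    pv_sum_digits a + pv_sum_digits b

-- ===== PORT B =====
-- if n < 10: return n; q, r = divmod(n, 10); best = r + f(q); if r <= 8: best = max(best, r+10+f(q-1))
def find_max_digit_sum_alt (n : Int) : Int :=
  if _h : n < 10 then n
  else
    let q := PySem.Int.floordiv n 10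
    let r := PySem.Int.mod n 10
    let best := r + find_max_digit_sum_alt q
    if r ≤ 8 then max best (r + 10 + find_max_digit_sum_alt (q - 1)) else best
termination_by n.toNat
decreasing_by
  · rw [PySem.Int.floordiv_eq_ediv_of_pos (by norm_num)]; omega
  · rw [PySem.Int.floordiv_eq_ediv_of_pos (by norm_num)]; omega

-- ===== PRECONDITION & SPEC =====
def Spec_find_max_digit_sum (n : Int) (out : Int) : Prop := out = find_max_digit_sum_alt n
instance (n : Int) (out : Int) : Decidable (Spec_find_max_digit_sum n out) := by unfold Spec_find_max_digit_sum; infer_instance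

-- ===== CLAIM (what is proved, stated in full; the proofs are below) =====
def Claim_equal_find_max_digit_sum : Prop := ∀ (n : Int), Dom_find_max_digit_sum n → Spec_find_max_digit_sum n (find_max_digit_sum n)

-- ===== LEMMAS AND PROOFS =====

-- reference digit sum on Nat
def pvSNat (n : Nat) : Int :=
  if _h : n = 0 then 0 else (n % 10 : Nat) + pvSNat (n / 10)
decreasing_by omega

-- reference digit count on Nat
def pvKNat (n : Nat) : Nat :=
  if _h : n = 0 then 0 else pvKNat (n / 10) + 1
decreasing_by omega

theorem pvSNat_zero : pvSNat 0 = 0 := by rw [pvSNat]; simp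

theorem pvSNat_pos (n : Nat) (h : ¬ n = 0) : pvSNat n = ((n % 10 : Nat) : Int) + pvSNat (n / 10) := by
  rw [pvSNat, dif_neg h]

theorem pvKNat_zero : pvKNat 0 = 0 := by rw [pvKNat]; simp

theorem pvKNat_pos (n : Nat) (h : ¬ n = 0) : pvKNat n = pvKNat (n / 10) + 1 := by
  rw [pvKNat, dif_neg h]

-- the character-value function A's sum_digits maps over str(x)
def pvF (c : Char) : Int := (PySem.Int.ofChars? [c]).getD 0

theorem pvF_digitChar (k : Nat) (hk : k < 10) : pvF (Nat.digitChar k) = (k : Int) := by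
  interval_cases k <;> decide

theorem pv_sum_toDigitsCore (fuel : Nat) : ∀ (n : Nat) (ds : List Char), n < fuel →
    ((Nat.toDigitsCore 10 fuel n ds).map pvF).sum
      = ((n % 10 : Nat) : Int) + pvSNat (n / 10) + ((ds.map pvF).sum) := by
  induction fuel with
  | zero => intro n ds h; exact absurd h (Nat.not_lt_zero n)
  | succ fuel ih =>
    intro n ds h
    rw [Nat.toDigitsCore]
    by_cases h10 : n / 10 = 0
    · rw [if_pos h10, h10]
      simp only [List.map_cons, List.sum_cons, pvF_digitChar (n % 10) (by omega), pvSNat_zero]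
      ring
    · rw [if_neg h10, ih (n / 10) _ (by omega)]
      simp only [List.map_cons, List.sum_cons, pvF_digitChar (n % 10) (by omega)]
      rw [pvSNat_pos (n / 10) h10]
      ring

theorem pv_sum_digits_eq (x : Int) (hx : 0 ≤ x) : pv_sum_digits x = pvSNat x.toNat := by
  unfold pv_sum_digits
  rw [PySem.Int.toList_toStr]
  unfold PySem.Int.toChars
  rw [if_neg (by omega)]
  unfold Nat.toDigits
  have hfun : (fun c => (PySem.Int.ofChars? [c]).getD 0) = pvF := rfl
  rw [hfun, pv_sum_toDigitsCore (x.toNat + 1) x.toNat [] (by omega)]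
  by_cases h0 : x.toNat = 0
  · simp [h0, pvSNat_zero]
  · rw [pvSNat_pos x.toNat h0]; simp

-- A's power loop equals p * 10^(digit count of m // p)
theorem pvPowLoop_eq : ∀ (fuel : Nat) (m p : Int), 0 ≤ m → 0 < p → (m + 1 - p).toNat < fuel →
    pvPowLoop fuel m p = p * (10 : Int) ^ pvKNat (m / p).toNat := by
  intro fuel
  induction fuel with
  | zero => intro m p hm hp hf; exact absurd hf (Nat.not_lt_zero _)
  | succ fuel ih =>
    intro m p hm hp hf
    simp only [pvPowLoop]
    by_cases h : p ≤ m
    · rw [if_pos h]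
      rw [ih m (p * 10) hm (by linarith) (by omega)]
      have hdd : m / (p * 10) = m / p / 10 := by rw [← Int.ediv_ediv_of_nonneg]; omega
      have hq0 : 0 ≤ m / p := Int.ediv_nonneg hm (by omega)
      have hne : ¬ (m / p).toNat = 0 := by
        have h1 : 1 ≤ m / p := (Int.le_ediv_iff_mul_le hp).mpr (by omega)
        omega
      rw [hdd, pvKNat_pos (m / p).toNat hne]
      have h1 : (m / p / 10).toNat = (m / p).toNat / 10 := by omega
      rw [h1, pow_succ]; ring
    · rw [if_neg h]
      have h0 : m / p = 0 := Int.ediv_eq_zero_of_lt hm (by omega)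
      rw [h0]
      simp [pvKNat_zero]

-- digit sum of 10^k - 1 is 9k
theorem pvSNat_nines (k : Nat) : pvSNat (10 ^ k - 1) = 9 * (k : Int) := by
  induction k with
  | zero => simp [pvSNat_zero]
  | succ k ih =>
    have hq : 1 ≤ 10 ^ k := Nat.one_le_pow _ _ (by omega)
    have hpow : 10 ^ (k + 1) = 10 * 10 ^ k := by rw [pow_succ]; ring
    have h1 : (10 ^ (k + 1) - 1) % 10 = 9 := by omega
    have h2 : (10 ^ (k + 1) - 1) / 10 = 10 ^ k - 1 := by omega
    rw [pvSNat_pos _ (by omega), h1, h2, ih]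
    push_cast; ring

-- 10^(digit count of t) ≤ 10 * t for t ≥ 1
theorem pvPow_le (t : Nat) (ht : 1 ≤ t) : 10 ^ pvKNat t ≤ 10 * t := by
  induction t using Nat.strong_induction_on with
  | _ t ih =>
  rw [pvKNat_pos t (by omega)]
  by_cases h : t / 10 = 0
  · rw [h, pvKNat_zero]; omega
  · have := ih (t / 10) (by omega) (by omega)
    calc 10 ^ (pvKNat (t / 10) + 1) = 10 * 10 ^ pvKNat (t / 10) := by rw [pow_succ]; ring
    _ ≤ 10 * (10 * (t / 10)) := by omega
    _ ≤ 10 * t := by omega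

-- every t lies below 10^(its digit count)
theorem pvLt_pow (t : Nat) : t < 10 ^ pvKNat t := by
  induction t using Nat.strong_induction_on with
  | _ t ih =>
  by_cases h : t = 0
  · simp [h, pvKNat_zero]
  · rw [pvKNat_pos t h, pow_succ]
    have := ih (t / 10) (by omega)
    omega

-- digit count is pinned by the interval 10^j ≤ t < 10^(j+1)
theorem pvKNat_char (j : Nat) : ∀ t, 10 ^ j ≤ t → t < 10 ^ (j + 1) → pvKNat t = j + 1 := by
  induction j with
  | zero =>
    intro t h1 h2
    have h1' : 1 ≤ t := by simpa using h1
    have h2' : t < 10 := by simpa using h2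
    rw [pvKNat_pos t (by omega), Nat.div_eq_of_lt (by omega), pvKNat_zero]
  | succ j ih =>
    intro t h1 h2
    have hp : (1:Nat) ≤ 10 ^ (j + 1) := Nat.one_le_pow _ _ (by omega)
    have ht1 : 10 ^ j ≤ t / 10 := by
      rw [Nat.le_div_iff_mul_le (by omega)]
      calc 10 ^ j * 10 = 10 ^ (j + 1) := by rw [pow_succ]
      _ ≤ t := h1
    have ht2 : t / 10 < 10 ^ (j + 1) := by
      rw [Nat.div_lt_iff_lt_mul (by omega)]
      calc t < 10 ^ (j + 2) := h2
      _ = 10 ^ (j + 1) * 10 := by rw [pow_succ]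
    rw [pvKNat_pos t (by omega), ih (t / 10) ht1 ht2]

-- low bound: 10^(pvKNat (q/10)) ≤ q for q ≥ 1
theorem pvPow_kdiv_le (q : Nat) (hq : 1 ≤ q) : 10 ^ pvKNat (q / 10) ≤ q := by
  by_cases h : q / 10 = 0
  · simp [h, pvKNat_zero]; omega
  · have := pvPow_le (q / 10) (by omega)
    omega

theorem pvSNat_digit (d : Nat) (hd : d < 10) : pvSNat d = d := by
  by_cases h : d = 0
  · simp [h, pvSNat_zero]
  · rw [pvSNat_pos d h, Nat.mod_eq_of_lt hd, Nat.div_eq_of_lt hd, pvSNat_zero]; ring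

theorem pvSNat_ten (m d : Nat) (hd : d < 10) : pvSNat (10 * m + d) = (d : Int) + pvSNat m := by
  by_cases h : 10 * m + d = 0
  · have hm : m = 0 := by omega
    have hd0 : d = 0 := by omega
    simp [hm, hd0, pvSNat_zero]
  · rw [pvSNat_pos _ h]
    have h1 : (10 * m + d) % 10 = d := by omega
    have h2 : (10 * m + d) / 10 = m := by omega
    rw [h1, h2]

theorem pvSNat_tenmul (m : Nat) : pvSNat (10 * m) = pvSNat m := by
  have := pvSNat_ten m 0 (by omega)
  simpa using this

-- incrementing raises the digit sum by at most one
theorem pvSNat_succ_le (t : Nat) : pvSNat (t + 1) ≤ pvSNat t + 1 := by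
  induction t using Nat.strong_induction_on with
  | _ t ih =>
  by_cases h : t % 10 ≤ 8
  · have e1 : t + 1 = 10 * (t / 10) + (t % 10 + 1) := by omega
    have e2 : t = 10 * (t / 10) + t % 10 := by omega
    rw [e1, pvSNat_ten _ _ (by omega)]
    conv_rhs => rw [e2, pvSNat_ten _ _ (by omega)]
    push_cast; omega
  · have h9 : t % 10 = 9 := by omega
    have e1 : t + 1 = 10 * (t / 10 + 1) := by omega
    have e2 : t = 10 * (t / 10) + 9 := by omega
    rw [e1, pvSNat_tenmul]
    conv_rhs => rw [e2, pvSNat_ten _ _ (by omega)]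
    have := ih (t / 10) (by omega)
    omega

-- digit sum of 9·10^j is 9
theorem pvSNat_nine_pow (j : Nat) : pvSNat (9 * 10 ^ j) = 9 := by
  induction j with
  | zero => simpa using pvSNat_digit 9 (by omega)
  | succ j ih =>
    have e : 9 * 10 ^ (j + 1) = 10 * (9 * 10 ^ j) := by rw [pow_succ]; ring
    rw [e, pvSNat_tenmul, ih]

-- the closed form both programs compute, as a function of a natural number
def pvG (n : Nat) : Int :=
  9 * (pvKNat (n / 10) : Int) + pvSNat (n + 1 - 10 ^ pvKNat (n / 10))

theorem pvG_small (n : Nat) (h : n < 10) : pvG n = n := by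
  unfold pvG
  rw [Nat.div_eq_of_lt h, pvKNat_zero]
  simpa using pvSNat_digit n h

theorem pvG_pred (q : Nat) (hq : 1 ≤ q) :
    pvG (q - 1) = 9 * (pvKNat (q / 10) : Int) + pvSNat (q - 10 ^ pvKNat (q / 10)) := by
  set k := pvKNat (q / 10) with hk
  have hle : 10 ^ k ≤ q := pvPow_kdiv_le q hq
  by_cases hgt : 10 ^ k < q
  · -- q - 1 still has the same digit count k + 1
    have hlt : q < 10 ^ (k + 1) := by
      have := pvLt_pow (q / 10)
      rw [← hk] at this
      calc q < 10 * (q / 10) + 10 := by omega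
      _ ≤ 10 * 10 ^ k := by omega
      _ = 10 ^ (k + 1) := by rw [pow_succ]; ring
    have hq2 : 2 ≤ q := by
      have : (1:Nat) ≤ 10 ^ k := Nat.one_le_pow _ _ (by omega)
      omega
    have hknat : pvKNat (q - 1) = k + 1 := pvKNat_char k (q - 1) (by omega) (by omega)
    have hkdiv : pvKNat ((q - 1) / 10) = k := by
      have := pvKNat_pos (q - 1) (by omega)
      omega
    unfold pvG
    rw [hkdiv]
    congr 2
    omega
  · -- q = 10^k exactly: q - 1 is all nines
    have heq : q = 10 ^ k := by omega
    have hrhs : q - 10 ^ k = 0 := by omega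
    rw [hrhs, pvSNat_zero]
    by_cases hk0 : k = 0
    · have : q = 1 := by rw [heq, hk0]; rfl
      rw [this]
      simpa [hk0] using pvG_small 0 (by omega)
    · have hk1 : 1 ≤ k := by omega
      have hpk : 10 ^ k = 10 * 10 ^ (k - 1) := by
        conv_lhs => rw [show k = (k - 1) + 1 by omega]
        rw [pow_succ]; ring
      have h1 : (10:Nat) ^ (k - 1) ≤ q - 1 := by
        have : (1:Nat) ≤ 10 ^ (k - 1) := Nat.one_le_pow _ _ (by omega)
        omega
      have h2 : q - 1 < 10 ^ (k - 1 + 1) := by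
        rw [show k - 1 + 1 = k by omega]; omega
      have hknat : pvKNat (q - 1) = k := by
        have := pvKNat_char (k - 1) (q - 1) h1 h2
        omega
      have hq19 : 9 ≤ q - 1 := by
        have : (1:Nat) ≤ 10 ^ (k - 1) := Nat.one_le_pow _ _ (by omega)
        omega
      have hkdiv : pvKNat ((q - 1) / 10) = k - 1 := by
        have := pvKNat_pos (q - 1) (by omega)
        omega
      unfold pvG
      rw [hkdiv]
      have harg : q - 1 + 1 - 10 ^ (k - 1) = 9 * 10 ^ (k - 1) := by omega
      rw [harg, pvSNat_nine_pow]
      omega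

-- B's digit DP computes the closed form
theorem pvAlt_eq_G : ∀ n : Nat, find_max_digit_sum_alt (n : Int) = pvG n := by
  intro n
  induction n using Nat.strong_induction_on with
  | _ n ih =>
  by_cases h10 : n < 10
  · rw [find_max_digit_sum_alt, dif_pos (by exact_mod_cast h10), pvG_small n h10]
  · rw [find_max_digit_sum_alt, dif_neg (by exact_mod_cast h10)]
    have hq1 : 1 ≤ n / 10 := by omega
    have hfd : PySem.Int.floordiv (n : Int) 10 = ((n / 10 : Nat) : Int) := by
      rw [PySem.Int.floordiv_eq_ediv_of_pos (by norm_num)]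
      omega
    have hmd : PySem.Int.mod (n : Int) 10 = ((n % 10 : Nat) : Int) := by
      rw [PySem.Int.mod_eq_emod_of_pos (by norm_num)]
      omega
    rw [hfd, hmd]
    show (if ((n % 10 : Nat) : Int) ≤ 8
        then max (((n % 10 : Nat) : Int) + find_max_digit_sum_alt ((n / 10 : Nat) : Int))
                 (((n % 10 : Nat) : Int) + 10 + find_max_digit_sum_alt (((n / 10 : Nat) : Int) - 1))
        else ((n % 10 : Nat) : Int) + find_max_digit_sum_alt ((n / 10 : Nat) : Int)) = pvG n
    have hqm1 : ((n / 10 : Nat) : Int) - 1 = ((n / 10 - 1 : Nat) : Int) := by omega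
    rw [hqm1, ih (n / 10) (by omega), ih (n / 10 - 1) (by omega)]
    -- names for the pieces
    set q := n / 10 with hqdef
    set r := n % 10 with hrdef
    set k := pvKNat (q / 10) with hkdef
    have hPle : 10 ^ k ≤ q := pvPow_kdiv_le q hq1
    have hP1 : (1:Nat) ≤ 10 ^ k := Nat.one_le_pow _ _ (by omega)
    set m := q + 1 - 10 ^ k with hmdef
    have hGq : pvG q = 9 * (k : Int) + pvSNat m := rfl
    have hGq1 : pvG (q - 1) = 9 * (k : Int) + pvSNat (m - 1) := by
      rw [pvG_pred q hq1, ← hkdef]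
      have harg0 : q - 10 ^ k = m - 1 := by omega
      rw [harg0]
    have hkn : pvKNat (n / 10) = k + 1 := by
      rw [pvKNat_pos q (by omega)]
    have hGn : pvG n = 9 * ((k : Int) + 1) + pvSNat (n + 1 - 10 ^ (k + 1)) := by
      unfold pvG
      rw [hkn]; push_cast; ring
    rw [hGn]
    have hpow : 10 ^ (k + 1) = 10 * 10 ^ k := by rw [pow_succ]; ring
    by_cases hr8 : ((r : Int) ≤ 8)
    · rw [if_pos hr8]
      have hr8n : r ≤ 8 := by exact_mod_cast hr8
      have harg : n + 1 - 10 ^ (k + 1) = 10 * (m - 1) + (r + 1) := by rw [hpow]; omega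
      rw [harg, pvSNat_ten (m - 1) (r + 1) (by omega), hGq, hGq1]
      have hmax : (r : Int) + (9 * (k : Int) + pvSNat m)
          ≤ (r : Int) + 10 + (9 * (k : Int) + pvSNat (m - 1)) := by
        have hm1 : m - 1 + 1 = m := by omega
        have := pvSNat_succ_le (m - 1)
        rw [hm1] at this
        omega
      rw [max_eq_right hmax]
      push_cast; ring
    · rw [if_neg hr8]
      have hr9 : r = 9 := by
        have : r < 10 := by omega
        have h9 : (8:Int) < (r:Int) := by omega
        omega
      have harg : n + 1 - 10 ^ (k + 1) = 10 * m := by rw [hpow]; omega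
      rw [harg, pvSNat_tenmul, hGq, hr9]
      push_cast; ring

-- ===== VERDICT (by name: the statement is the Claim_ definition above) =====
theorem find_max_digit_sum_spec : Claim_equal_find_max_digit_sum := by
  intro n _
  unfold Spec_find_max_digit_sum
  by_cases hn : n < 10
  · rw [find_max_digit_sum, if_pos hn, find_max_digit_sum_alt, dif_pos hn]
  · have hn0 : 0 ≤ n := by omega
    lift n to Nat using hn0 with N hN
    rw [find_max_digit_sum, if_neg hn, pvAlt_eq_G N]
    rw [PySem.Int.floordiv_eq_ediv_of_pos (by norm_num)]
    show pv_sum_digits (pvPowLoop (((N:Int) / 10).toNat + 1) ((N:Int) / 10) 1 - 1)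
          + pv_sum_digits ((N:Int) - (pvPowLoop (((N:Int) / 10).toNat + 1) ((N:Int) / 10) 1 - 1))
        = pvG N
    have hN10 : 10 ≤ N := by omega
    have hm0 : (0:Int) ≤ (N : Int) / 10 := by omega
    rw [pvPowLoop_eq (((N:Int) / 10).toNat + 1) ((N:Int) / 10) 1 hm0 (by norm_num) (by omega)]
    rw [Int.ediv_one]
    have hdiv : ((N:Int) / 10).toNat = N / 10 := by omega
    rw [hdiv]
    simp only [one_mul]
    have hPle : 10 ^ pvKNat (N / 10) ≤ N := pvPow_kdiv_le N (by omega)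
    have hcastP : ((10:Int)) ^ pvKNat (N / 10) = ((10 ^ pvKNat (N / 10) : Nat) : Int) := by
      push_cast; ring
    have hP1 : (1:Nat) ≤ 10 ^ pvKNat (N / 10) := Nat.one_le_pow _ _ (by omega)
    have ha0 : (0:Int) ≤ (10:Int) ^ pvKNat (N / 10) - 1 := by rw [hcastP]; omega
    have hb0 : (0:Int) ≤ (N:Int) - ((10:Int) ^ pvKNat (N / 10) - 1) := by rw [hcastP]; omega
    rw [pv_sum_digits_eq _ ha0, pv_sum_digits_eq _ hb0]
    have hta : ((10:Int) ^ pvKNat (N / 10) - 1).toNat = 10 ^ pvKNat (N / 10) - 1 := by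
      rw [hcastP]; omega
    have htb : ((N:Int) - ((10:Int) ^ pvKNat (N / 10) - 1)).toNat = N + 1 - 10 ^ pvKNat (N / 10) := by
      rw [hcastP]; omega
    rw [hta, htb, pvSNat_nines]
    unfold pvG
    ring
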